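-- pv_equiv track=rewrite | github.com/Trantor2098/hot_node | utils/utils.py | split_by_slash
-- ===== SOURCE A (Python) =====
-- def split_by_slash(string: str):
--     '''Split the string by " / ". Note the space next to the slash will be removed.'''
--     if string == "":
--         return []
--     keys = string.split(sep="/")
--     for i in range(len(keys)):
--         string: str = keys[i]
--         if string.startswith(" "):
--             string = string[1:]
--         if string.endswith(" "):
--             string = string[:-1]
--         keys[i] = string
--     return keys
-- ===== SOURCE B (Python) =====
-- def split_by_slash(string: str):
--     '''Single pass: split at '/', letting each slash consume one adjacent space
--     on each side; one leading/trailing space of the whole string is consumed up front.'''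
--     if string == "":
--         return []
--     if string.startswith(" "):
--         string = string[1:]
--     if string.endswith(" "):
--         string = string[:-1]
--     out = []
--     cur = []
--     i = 0
--     n = len(string)
--     while i < n:
--         c = string[i]
--         if c == '/':
--             out.append(''.join(cur))
--             cur = []
--             if i + 1 < n and string[i + 1] == ' ':
--                 i += 1
--         elif c == ' ' and i + 1 < n and string[i + 1] == '/':
--             pass  # this space is consumed by the slash that follows
--         else:
--             cur.append(c)
--         i += 1
--     out.append(''.join(cur))
--     return out
-- ===== Notes on version B (the rewrite author's own statement) =====
-- stated objective: alternative
-- what changed: A splits the string on the slash character and then makes a second pass stripping one leading and one trailing space from every segment; B makes a single left-to-right scan in which each slash consumes one adjacent space on each side (after consuming one space at each end of the whole string), fusing the split and the strip pass into one loop.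
import Mathlib
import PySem

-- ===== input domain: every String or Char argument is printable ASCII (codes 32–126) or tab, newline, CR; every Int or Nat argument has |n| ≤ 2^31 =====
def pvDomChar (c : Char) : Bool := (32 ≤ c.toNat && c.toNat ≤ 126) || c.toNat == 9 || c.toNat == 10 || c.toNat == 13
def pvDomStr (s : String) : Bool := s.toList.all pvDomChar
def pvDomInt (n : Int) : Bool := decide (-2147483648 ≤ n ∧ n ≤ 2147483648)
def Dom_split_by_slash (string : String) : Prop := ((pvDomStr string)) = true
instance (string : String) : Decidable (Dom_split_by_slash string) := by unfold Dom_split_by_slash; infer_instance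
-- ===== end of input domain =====

-- B replaces A's split-on-"/" plus per-segment one-space-strip pass by a single left-to-right
-- scan in which each slash consumes one adjacent space on each side (objective: alternative).

-- ===== PORT A =====
-- the body of A's for-loop: strip one leading and one trailing space
def stripOnePy (s : String) : String :=
  let s1 := if PySem.Str.startswith s " " then PySem.Str.slice s (some 1) none else s
  if PySem.Str.endswith s1 " " then PySem.Str.slice s1 none (some (-1)) else s1

def split_by_slash (string : String) : List String :=
  if string == "" then []
  else
    -- string.split(sep="/"): sep is the non-empty literal "/", PySem.Chars.splitOn is exact here
    let keys := (PySem.Chars.splitOn string.toList ['/']).map String.ofList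
    keys.map stripOnePy

-- ===== PORT B =====
-- the while-loop of Source B: s = remaining input, cur = current segment, out = finished segments
def bGo (s : List Char) (cur : List Char) (out : List String) : List String :=
  match s with
  | [] => out ++ [String.ofList cur]
  | c :: rest =>
    if c = '/' then
      -- close the segment; a single space directly after the slash is consumed (i += 1)
      bGo (if rest.head? = some ' ' then rest.tail else rest) [] (out ++ [String.ofList cur])
    else if c = ' ' ∧ rest.head? = some '/' then
      -- this space is consumed by the slash that follows (pass)
      bGo rest cur out
    else
      bGo rest (cur ++ [c]) out
  termination_by s.length
  decreasing_by
  · cases rest with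
    | nil => simp
    | cons b t => by_cases hb : b = ' ' <;> simp [hb]
  · simp
  · simp

def split_by_slash_alt (string : String) : List String :=
  if string == "" then []
  else
    let s1 := if PySem.Str.startswith string " " then PySem.Str.slice string (some 1) none else string
    let s2 := if PySem.Str.endswith s1 " " then PySem.Str.slice s1 none (some (-1)) else s1
    bGo s2.toList [] []

-- ===== PRECONDITION & SPEC =====
def Spec_split_by_slash (string : String) (out : List String) : Prop := out = split_by_slash_alt string
instance (string : String) (out : List String) : Decidable (Spec_split_by_slash string out) := by unfold Spec_split_by_slash; infer_instance

-- ===== CLAIM (what is proved, stated in full; the proofs are below) =====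
def Claim_equal_split_by_slash : Prop := ∀ (string : String), Dom_split_by_slash string → Spec_split_by_slash string (split_by_slash string)

-- ===== LEMMAS AND PROOFS =====

-- drop one leading / one trailing space (list level)
def stripL (l : List Char) : List Char := if l.head? = some ' ' then l.tail else l
def stripR (l : List Char) : List Char := if l.getLast? = some ' ' then l.dropLast else l
def strip1 (l : List Char) : List Char := stripR (stripL l)

-- reference split on '/'
def splitRef : List Char → List (List Char)
  | [] => [[]]
  | c :: rest =>
    if c = '/' then [] :: splitRef rest
    else match splitRef rest with
      | [] => [[c]]
      | x :: xs => (c :: x) :: xs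

-- list-level machine mirroring bGo
def mGo (s : List Char) (cur : List Char) : List (List Char) :=
  match s with
  | [] => [cur]
  | c :: rest =>
    if c = '/' then
      cur :: mGo (if rest.head? = some ' ' then rest.tail else rest) []
    else if c = ' ' ∧ rest.head? = some '/' then
      mGo rest cur
    else
      mGo rest (cur ++ [c])
  termination_by s.length
  decreasing_by
  · cases rest with
    | nil => simp
    | cons b t => by_cases hb : b = ' ' <;> simp [hb]
  · simp
  · simp

-- A's result on the tail segments (first segment: only trailing strip)
def fA : List (List Char) → List (List Char)
  | [] => []
  | x :: xs => stripR x :: xs.map strip1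

theorem splitRef_ne_nil (l : List Char) : splitRef l ≠ [] := by
  cases l with
  | nil => simp [splitRef]
  | cons c rest =>
    simp only [splitRef]
    split
    · simp
    · split <;> simp_all

theorem mGo_ne_nil (l cur : List Char) : mGo l cur ≠ [] := by
  induction l, cur using mGo.induct with
  | case1 cur => simp [mGo]
  | case2 cur rest ih => rw [mGo]; simp
  | case3 cur c rest h1 h2 ih => rw [mGo]; simp only [if_neg h1, if_pos h2]; exact ih
  | case4 cur c rest h1 h2 ih => rw [mGo]; simp only [if_neg h1, if_neg h2]; exact ih

theorem stripR_cons (c : Char) (l : List Char) (h : l ≠ []) :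
    stripR (c :: l) = c :: stripR l := by
  obtain ⟨b, t, rfl⟩ := List.exists_cons_of_ne_nil h
  unfold stripR
  rw [List.getLast?_cons_cons]
  split
  · simp [List.dropLast]
  · rfl

theorem stripLR_comm (l : List Char) : stripL (stripR l) = stripR (stripL l) := by
  cases l with
  | nil => simp [stripL, stripR]
  | cons a rest =>
    cases hr : rest with
    | nil =>
      by_cases ha : a = ' ' <;> simp [stripL, stripR, ha]
    | cons b t =>
      subst hr
      rw [stripR_cons a _ (by simp)]
      by_cases ha : a = ' '
      · subst ha
        simp [stripL]
      · have h1 : stripL (a :: stripR (b :: t)) = a :: stripR (b :: t) := by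
          simp [stripL, ha]
        have h2 : stripL (a :: b :: t) = a :: b :: t := by
          simp [stripL, ha]
        rw [h1, h2, stripR_cons a _ (by simp)]

theorem stripL_length (l : List Char) : (stripL l).length ≤ l.length := by
  unfold stripL
  split
  · cases l <;> simp
  · exact le_rfl

-- head of a right-stripped list starting with '/' is still '/'
theorem head_stripR_cons (b : Char) (t : List Char) (ch : Char)
    (h : (stripR (b :: t)).head? = some ch) : b = ch := by
  cases t with
  | nil =>
    by_cases hb : b = ' ' <;> simp [stripR, hb] at h <;> simp_all
  | cons d u =>
    rw [stripR_cons b _ (by simp)] at h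
    simpa using h

theorem head_stripR_slash (t : List Char) : (stripR ('/' :: t)).head? = some '/' := by
  cases t with
  | nil => simp [stripR]
  | cons d u => rw [stripR_cons _ _ (by simp)]; rfl

theorem splitRef_head_empty {b : Char} {t : List Char} {xs : List (List Char)}
    (h : splitRef (b :: t) = [] :: xs) : b = '/' := by
  by_contra hb
  rw [splitRef, if_neg hb] at h
  obtain ⟨x', xs', hx'⟩ := List.exists_cons_of_ne_nil (splitRef_ne_nil t)
  rw [hx'] at h
  simp at h

-- accumulator lemma: bGo = out ++ ofList-image of mGo
theorem bGo_eq_mGo (l cur : List Char) (out : List String) :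
    bGo l cur out = out ++ (mGo l cur).map String.ofList := by
  induction l, cur using mGo.induct generalizing out with
  | case1 cur => simp [bGo, mGo]
  | case2 cur rest ih =>
    rw [bGo, mGo]
    simp only [dite_eq_ite] at *
    rw [ih]
    simp
  | case3 cur c rest h1 h2 ih =>
    rw [bGo, mGo]
    simp only [if_neg h1, if_pos h2]
    exact ih out
  | case4 cur c rest h1 h2 ih =>
    rw [bGo, mGo]
    simp only [if_neg h1, if_neg h2]
    exact ih out

-- segment-prefix lemma for mGo
theorem mGo_cur (l : List Char) : ∀ cur,
    mGo l cur = match mGo l [] with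
      | [] => []
      | x :: xs => (cur ++ x) :: xs := by
  induction l with
  | nil => intro cur; simp [mGo]
  | cons c rest ih =>
    intro cur
    by_cases hc : c = '/'
    · subst hc
      rw [mGo, if_pos rfl]
      conv_rhs => rw [mGo, if_pos rfl]
      simp
    · by_cases hsp : c = ' ' ∧ rest.head? = some '/'
      · rw [mGo, if_neg hc, if_pos hsp]
        conv_rhs => rw [mGo, if_neg hc, if_pos hsp]
        exact ih cur
      · rw [mGo, if_neg hc, if_neg hsp]
        conv_rhs => rw [mGo, if_neg hc, if_neg hsp]
        rw [ih (cur ++ [c])]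
        simp only [List.nil_append]
        rw [ih [c]]
        obtain ⟨x, xs, hx⟩ := List.exists_cons_of_ne_nil (mGo_ne_nil rest [])
        rw [hx]
        simp

-- splitOn.go characterised by splitRef
theorem go_spec : ∀ fuel (l cur : List Char) (acc : List (List Char)), l.length < fuel →
    PySem.Chars.splitOn.go ['/'] fuel l cur acc =
      acc.reverse ++ (match splitRef l with
        | [] => []
        | x :: xs => (cur.reverse ++ x) :: xs) := by
  intro fuel
  induction fuel with
  | zero => intro l cur acc h; simp at h
  | succ f ih =>
    intro l cur acc h
    cases l with
    | nil => simp [PySem.Chars.splitOn.go, splitRef]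
    | cons c rest =>
      rw [PySem.Chars.splitOn.go]
      by_cases hc : c = '/'
      · subst hc
        have hpre : List.isPrefixOf ['/'] ('/' :: rest) = true := by
          simp [List.isPrefixOf]
        rw [if_pos hpre]
        rw [show List.drop ['/'].length ('/' :: rest) = rest from rfl]
        rw [ih rest [] (List.reverse cur :: acc) (by simp at h ⊢; omega)]
        obtain ⟨x, xs, hx⟩ := List.exists_cons_of_ne_nil (splitRef_ne_nil rest)
        simp [splitRef, hx]
      · have hpre : List.isPrefixOf ['/'] (c :: rest) = false := by
          simp [List.isPrefixOf]
          exact fun h' => hc h'.symm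
        rw [if_neg (by simp [hpre])]
        rw [ih rest (c :: cur) acc (by simp at h ⊢; omega)]
        obtain ⟨x, xs, hx⟩ := List.exists_cons_of_ne_nil (splitRef_ne_nil rest)
        simp [splitRef, hx, hc]

theorem splitOn_eq_splitRef (l : List Char) :
    PySem.Chars.splitOn l ['/'] = splitRef l := by
  unfold PySem.Chars.splitOn
  rw [go_spec (l.length + 1) l [] [] (by omega)]
  obtain ⟨x, xs, hx⟩ := List.exists_cons_of_ne_nil (splitRef_ne_nil l)
  simp [hx]

-- E1: stripping one leading space of the whole string strips it off the first segment
theorem splitRef_stripL (l : List Char) :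
    splitRef (stripL l) = match splitRef l with
      | [] => []
      | x :: xs => stripL x :: xs := by
  cases l with
  | nil => simp [stripL, splitRef]
  | cons c rest =>
    by_cases hc : c = ' '
    · subst hc
      rw [show stripL (' ' :: rest) = rest from by simp [stripL]]
      obtain ⟨x, xs, hx⟩ := List.exists_cons_of_ne_nil (splitRef_ne_nil rest)
      conv_rhs => rw [splitRef]
      simp [hx, stripL]
    · rw [show stripL (c :: rest) = c :: rest from by simp [stripL, hc]]
      by_cases hsl : c = '/'
      · subst hsl
        rw [show splitRef ('/' :: rest) = [] :: splitRef rest from by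
          rw [splitRef, if_pos rfl]]
        simp [stripL]
      · obtain ⟨x, xs, hx⟩ := List.exists_cons_of_ne_nil (splitRef_ne_nil rest)
        rw [show splitRef (c :: rest) = (c :: x) :: xs from by
          rw [splitRef, if_neg hsl, hx]]
        simp [stripL, hc]

-- Core: machine on a right-stripped input = trailing strip on first segment, full strip on the rest
theorem core (n : ℕ) : ∀ l : List Char, l.length ≤ n →
    mGo (stripR l) [] = fA (splitRef l) := by
  induction n using Nat.strong_induction_on with
  | _ n ih =>
  have hmain : ∀ r : List Char, r.length < n →
      mGo (stripR (stripL r)) [] = (splitRef r).map strip1 := by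
    intro r hr
    have h1 := ih r.length hr (stripL r) (stripL_length r)
    rw [h1, splitRef_stripL]
    obtain ⟨x, xs, hx⟩ := List.exists_cons_of_ne_nil (splitRef_ne_nil r)
    rw [hx]
    simp [fA, strip1]
  intro l hl
  cases l with
  | nil => simp [stripR, mGo, splitRef, fA]
  | cons c rest =>
    cases hrest : rest with
    | nil =>
      subst hrest
      by_cases hc : c = '/'
      · subst hc
        rw [show stripR ['/'] = ['/'] by simp [stripR]]
        rw [mGo, if_pos rfl]
        simp [mGo, splitRef, fA, stripR, strip1, stripL]
      · by_cases hsp : c = ' '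
        · subst hsp
          rw [show stripR [' '] = ([] : List Char) by simp [stripR]]
          simp [mGo, splitRef, fA, stripR, hc]
        · rw [show stripR [c] = [c] by simp [stripR, hsp]]
          rw [mGo, if_neg hc, if_neg (by simp [hsp])]
          simp [mGo, splitRef, fA, stripR, hc, hsp]
    | cons b t =>
      subst hrest
      rw [stripR_cons c (b :: t) (by simp)]
      by_cases hc : c = '/'
      · subst hc
        rw [mGo, if_pos rfl]
        rw [show (if (stripR (b :: t)).head? = some ' ' then (stripR (b :: t)).tail
              else stripR (b :: t)) = stripL (stripR (b :: t)) from rfl]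
        rw [stripLR_comm]
        rw [hmain (b :: t) (by simp at hl ⊢; omega)]
        rw [show splitRef ('/' :: b :: t) = [] :: splitRef (b :: t) from by
          rw [splitRef, if_pos rfl]]
        simp [fA, stripR]
      · by_cases hsp : c = ' ' ∧ (stripR (b :: t)).head? = some '/'
        · obtain ⟨hc', hqh⟩ := hsp
          subst hc'
          have hb : b = '/' := head_stripR_cons b t '/' hqh
          subst hb
          rw [mGo, if_neg (by decide), if_pos ⟨rfl, hqh⟩]
          have hcore := ih ('/' :: t).length (by simp at hl ⊢; omega) ('/' :: t) le_rfl
          rw [hcore]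
          rw [show splitRef ('/' :: t) = [] :: splitRef t from by
            rw [splitRef, if_pos rfl]]
          rw [show splitRef (' ' :: '/' :: t) = [' '] :: splitRef t from by
            rw [splitRef, if_neg (by decide)]
            rw [show splitRef ('/' :: t) = [] :: splitRef t from by
              rw [splitRef, if_pos rfl]]]
          simp [fA, stripR]
        · rw [mGo, if_neg hc, if_neg hsp]
          rw [show ([] : List Char) ++ [c] = [c] from rfl]
          rw [mGo_cur (stripR (b :: t)) [c]]
          have hcore := ih (b :: t).length (by simp at hl ⊢; omega) (b :: t) le_rfl
          rw [hcore]
          obtain ⟨x, xs, hx⟩ := List.exists_cons_of_ne_nil (splitRef_ne_nil (b :: t))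
          rw [hx]
          rw [show splitRef (c :: b :: t) = (c :: x) :: xs by
            rw [splitRef, if_neg hc, hx]]
          simp only [fA]
          by_cases hx0 : x = []
          · subst hx0
            have hb : b = '/' := splitRef_head_empty hx
            subst hb
            have : (stripR ('/' :: t)).head? = some '/' := head_stripR_slash t
            have hce : c ≠ ' ' := fun hce => hsp ⟨hce, this⟩
            simp [stripR, hce]
          · rw [stripR_cons c x hx0]
            simp

theorem main_list (l : List Char) :
    mGo (stripR (stripL l)) [] = (splitRef l).map strip1 := by
  have h1 := core (stripL l).length (stripL l) le_rfl
  rw [h1, splitRef_stripL]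
  obtain ⟨x, xs, hx⟩ := List.exists_cons_of_ne_nil (splitRef_ne_nil l)
  rw [hx]
  simp [fA, strip1]

-- string-level bridges
theorem prefix_space (l : List Char) : [' '] <+: l ↔ l.head? = some ' ' := by
  cases l with
  | nil => simp
  | cons c t => simp [List.cons_prefix_iff]

theorem suffix_space (l : List Char) : [' '] <:+ l ↔ l.getLast? = some ' ' := by
  rw [List.getLast?_eq_some_iff]
  constructor
  · rintro ⟨t, rfl⟩; exact ⟨t, rfl⟩
  · rintro ⟨t, rfl⟩; exact ⟨t, rfl⟩

set_option maxHeartbeats 1000000 in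
theorem startPart (s : String) :
    ((if PySem.Str.startswith s " " then PySem.Str.slice s (some 1) none else s)).toList
      = stripL s.toList := by
  by_cases h : PySem.Str.startswith s " " = true
  · rw [if_pos h]
    have hh : s.toList.head? = some ' ' := by
      rw [← prefix_space]
      simpa [pysem] using h
    rw [show (PySem.Str.slice s (some 1) none).toList = s.toList.drop 1 by simp [pysem]]
    rw [stripL, if_pos hh, List.drop_one]
  · rw [if_neg h]
    have hh : ¬ s.toList.head? = some ' ' := by
      rw [← prefix_space]
      intro hp
      exact h (by simpa [pysem] using hp)
    rw [stripL, if_neg hh]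

set_option maxHeartbeats 1000000 in
theorem endPart (u : String) :
    ((if PySem.Str.endswith u " " then PySem.Str.slice u none (some (-1)) else u)).toList
      = stripR u.toList := by
  by_cases h : PySem.Str.endswith u " " = true
  · rw [if_pos h]
    have hh : u.toList.getLast? = some ' ' := by
      rw [← suffix_space]
      simpa [pysem] using h
    rw [show (PySem.Str.slice u none (some (-1))).toList = u.toList.dropLast by simp [pysem]]
    rw [stripR, if_pos hh]
  · rw [if_neg h]
    have hh : ¬ u.toList.getLast? = some ' ' := by
      rw [← suffix_space]
      intro hp
      exact h (by simpa [pysem] using hp)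
    rw [stripR, if_neg hh]

theorem toList_stripOnePy (s : String) : (stripOnePy s).toList = strip1 s.toList := by
  rw [show stripOnePy s = (if PySem.Str.endswith
        (if PySem.Str.startswith s " " then PySem.Str.slice s (some 1) none else s) " "
      then PySem.Str.slice
        (if PySem.Str.startswith s " " then PySem.Str.slice s (some 1) none else s) none (some (-1))
      else (if PySem.Str.startswith s " " then PySem.Str.slice s (some 1) none else s)) from rfl]
  rw [endPart, startPart, strip1]

theorem stripOnePy_ofList (x : List Char) :
    stripOnePy (String.ofList x) = String.ofList (strip1 x) := by
  have h := toList_stripOnePy (String.ofList x)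
  rw [String.toList_ofList] at h
  calc stripOnePy (String.ofList x)
      = String.ofList (stripOnePy (String.ofList x)).toList := by simp
    _ = String.ofList (strip1 x) := by rw [h]

-- ===== VERDICT (by name: the statement is the Claim_ definition above) =====
theorem split_by_slash_spec : Claim_equal_split_by_slash := by
  intro s _
  show split_by_slash s = split_by_slash_alt s
  by_cases hs : s = ""
  · subst hs
    simp [split_by_slash, split_by_slash_alt]
  · have hne : (s == "") = false := by simp [hs]
    simp only [split_by_slash, split_by_slash_alt, hne, Bool.false_eq_true, if_false]
    rw [endPart, startPart, bGo_eq_mGo, main_list]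
    rw [splitOn_eq_splitRef, List.map_map, List.map_map]
    simp only [List.nil_append]
    apply List.map_congr_left
    intro x _
    simp [Function.comp, stripOnePy_ofList]
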